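-- pv_equiv track=rewrite | github.com/skang6283/algorithm_daily | Programmers/Greedy/조이스틱.py | dfs
-- ===== SOURCE A (Python) =====
-- from collections import deque
--
-- def dfs(input, dir, answer, n):
--     ud = deque(input)
--     if not ud:
--         return answer
--
--     if dir == 0:
--         cur = ud.popleft()
--         if not ud: return answer
--         right = ud[0]
--         left = ud[-1]
--
--         answer = min(dfs(list(ud)[:], 0, answer + right - cur, n), dfs(list(ud)[:], 1, answer + n - left + cur, n))
--
--     else:
--         cur = ud.pop()
--         if not ud: return answer
--
--         right = ud[0]
--         left = ud[-1]
--
--         answer = min(dfs(list(ud)[:], 0, answer + cur - left, n), dfs(list(ud)[:], 1, answer + n - cur + right, n))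
--
--     return answer
-- ===== SOURCE B (Python) =====
-- def dfs(input, dir, answer, n):
--     # Bottom-up DP over contiguous windows with rolling arrays: O(n^2) instead of A's exponential branching.
--     m = len(input)
--     if m <= 1:
--         return answer
--     # f0[i] / f1[i]: cost contribution of A's recursion on the window input[i:i+L] entered with direction 0 / 1
--     f0 = [0] * m
--     f1 = [0] * m
--     for L in range(1, m):
--         g0 = []
--         g1 = []
--         for i in range(m - L):
--             g0.append(min(f0[i + 1] + input[i + 1] - input[i],
--                           f1[i + 1] + n - input[i + L] + input[i]))
--             g1.append(min(f0[i] + input[i + L] - input[i + L - 1],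
--                           f1[i] + n - input[i + L] + input[i]))
--         f0, f1 = g0, g1
--     return answer + (f0[0] if dir == 0 else f1[0])
-- ===== Notes on version B (the rewrite author's own statement) =====
-- stated objective: faster
-- what changed: A's exponential two-way branching recursion (copying the deque at every call) is replaced by a bottom-up dynamic program over contiguous index windows with rolling arrays, exploiting that the answer parameter is a pure additive accumulator.
import Mathlib
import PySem

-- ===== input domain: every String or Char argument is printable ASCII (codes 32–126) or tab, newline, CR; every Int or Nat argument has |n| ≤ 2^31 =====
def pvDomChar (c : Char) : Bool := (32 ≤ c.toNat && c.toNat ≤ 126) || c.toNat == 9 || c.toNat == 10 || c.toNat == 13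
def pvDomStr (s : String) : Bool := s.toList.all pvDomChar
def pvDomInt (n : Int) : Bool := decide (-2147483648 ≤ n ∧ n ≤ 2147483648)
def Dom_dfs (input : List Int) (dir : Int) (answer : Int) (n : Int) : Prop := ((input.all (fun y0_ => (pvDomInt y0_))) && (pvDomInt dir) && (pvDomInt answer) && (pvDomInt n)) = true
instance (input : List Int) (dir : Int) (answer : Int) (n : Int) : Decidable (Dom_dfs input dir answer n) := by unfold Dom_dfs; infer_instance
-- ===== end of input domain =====

-- B replaces A's exponential two-way branching recursion by a bottom-up O(n^2) dynamic program
-- over contiguous windows of the input (rolling arrays), returning identical values.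

-- ===== PORT A =====
-- Literal transliteration of A: deque popleft/pop become head/tail and getLast/dropLast;
-- ud[0] / ud[-1] are read as headD / getLastD, exact here because both reads are guarded by
-- the emptiness test just above them.
def dfs (input : List Int) (dir : Int) (answer : Int) (n : Int) : Int :=
  match input with
  | [] => answer
  | cur0 :: rest =>
    if dir == 0 then
      -- cur = ud.popleft(); ud = rest
      if rest.isEmpty then answer
      else
        min (dfs rest 0 (answer + rest.headD 0 - cur0) n)
            (dfs rest 1 (answer + n - rest.getLastD 0 + cur0) n)
    else
      -- cur = ud.pop(); ud = dropLast
      let cur := (cur0 :: rest).getLastD 0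
      let ud := (cur0 :: rest).dropLast
      if ud.isEmpty then answer
      else
        min (dfs ud 0 (answer + cur - ud.getLastD 0) n)
            (dfs ud 1 (answer + n - cur + ud.headD 0) n)
termination_by input.length
decreasing_by
  · simp
  · simp
  · simp [List.length_dropLast]
  · simp [List.length_dropLast]

-- ===== PORT B =====
-- one iteration of B's outer loop (window length L → L+1); inner loop appends to both rolling arrays.
-- All Python indices here are nonnegative and in range, so List.getD is exact.
def dfsAltStep (input : List Int) (n : Int) (m : Nat) (f : List Int × List Int) (L : Nat) :
    List Int × List Int :=
  (List.range (m - L)).foldl (fun g i =>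
    (g.1 ++ [min (f.1.getD (i + 1) 0 + input.getD (i + 1) 0 - input.getD i 0)
                 (f.2.getD (i + 1) 0 + n - input.getD (i + L) 0 + input.getD i 0)],
     g.2 ++ [min (f.1.getD i 0 + input.getD (i + L) 0 - input.getD (i + L - 1) 0)
                 (f.2.getD i 0 + n - input.getD (i + L) 0 + input.getD i 0)])) ([], [])

def dfs_alt (input : List Int) (dir : Int) (answer : Int) (n : Int) : Int :=
  let m := input.length
  if m ≤ 1 then answer
  else
    let f := (List.range' 1 (m - 1)).foldl (dfsAltStep input n m)
               (List.replicate m 0, List.replicate m 0)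
    answer + (if dir == 0 then f.1.getD 0 0 else f.2.getD 0 0)

-- ===== PRECONDITION & SPEC =====
def Spec_dfs (input : List Int) (dir : Int) (answer : Int) (n : Int) (out : Int) : Prop := out = dfs_alt input dir answer n
instance (input : List Int) (dir : Int) (answer : Int) (n : Int) (out : Int) : Decidable (Spec_dfs input dir answer n out) := by unfold Spec_dfs; infer_instance

-- ===== CLAIM (what is proved, stated in full; the proofs are below) =====
def Claim_equal_dfs : Prop := ∀ (input : List Int) (dir : Int) (answer : Int) (n : Int), Dom_dfs input dir answer n → Spec_dfs input dir answer n (dfs input dir answer n)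

-- ===== LEMMAS AND PROOFS =====

-- the answer parameter is a pure additive accumulator
lemma dfs_add (l : List Int) (d a n : Int) : dfs l d a n = a + dfs l d 0 n := by
  induction hk : l.length using Nat.strong_induction_on generalizing l d a with
  | _ k ih =>
  have h0 : ∀ (l' : List Int) (d' a' : Int), l'.length < k → dfs l' d' a' n = a' + dfs l' d' 0 n :=
    fun l' d' a' h => ih _ h l' d' a' rfl
  cases l with
  | nil => simp [dfs]
  | cons cur0 rest =>
    have hlen : rest.length < k := by simp at hk; omega
    have hlen' : (cur0 :: rest).dropLast.length < k := by simp at hk ⊢; omega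
    rw [dfs, dfs]
    by_cases hd : d == 0
    · simp only [hd, if_true]
      by_cases hr : rest.isEmpty
      · simp [hr]
      · simp only [hr, Bool.false_eq_true, if_false]
        rw [h0 rest 0 (a + rest.headD 0 - cur0) hlen,
            h0 rest 1 (a + n - rest.getLastD 0 + cur0) hlen,
            h0 rest 0 (0 + rest.headD 0 - cur0) hlen,
            h0 rest 1 (0 + n - rest.getLastD 0 + cur0) hlen]
        omega
    · simp only [hd, Bool.false_eq_true, if_false]
      by_cases hr : (cur0 :: rest).dropLast.isEmpty
      · simp [hr]
      · simp only [hr, Bool.false_eq_true, if_false]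
        rw [h0 _ 0 (a + (cur0 :: rest).getLastD 0 - (cur0 :: rest).dropLast.getLastD 0) hlen',
            h0 _ 1 (a + n - (cur0 :: rest).getLastD 0 + (cur0 :: rest).dropLast.headD 0) hlen',
            h0 _ 0 (0 + (cur0 :: rest).getLastD 0 - (cur0 :: rest).dropLast.getLastD 0) hlen',
            h0 _ 1 (0 + n - (cur0 :: rest).getLastD 0 + (cur0 :: rest).dropLast.headD 0) hlen']
        omega

-- window of length w starting at i
def win (input : List Int) (i w : Nat) : List Int := (input.drop i).take w

lemma win_cons (input : List Int) (i w : Nat) (hi : i < input.length) :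
    win input i (w + 1) = input.getD i 0 :: win input (i + 1) w := by
  unfold win
  rw [List.drop_eq_getElem_cons hi, List.take_succ_cons, List.getD_eq_getElem _ _ hi]

lemma win_length (input : List Int) (i w : Nat) (hi : i + w ≤ input.length) :
    (win input i w).length = w := by
  simp [win]; omega

lemma win_headD (input : List Int) (i w : Nat) (h1 : 1 ≤ w) (hi : i < input.length) :
    (win input i w).headD 0 = input.getD i 0 := by
  obtain ⟨w', rfl⟩ : ∃ w', w = w' + 1 := ⟨w - 1, by omega⟩
  rw [win_cons input i w' hi]; rfl

lemma win_getLastD (input : List Int) (i w : Nat) (h1 : 1 ≤ w) (hi : i + w ≤ input.length) :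
    (win input i w).getLastD 0 = input.getD (i + w - 1) 0 := by
  have hlt : i + w - 1 < input.length := by omega
  have hlen := win_length input i w hi
  rw [List.getLastD_eq_getLast?, List.getLast?_eq_getElem?, hlen,
      List.getD_eq_getElem _ _ hlt]
  have hwl : w - 1 < (win input i w).length := by omega
  rw [List.getElem?_eq_getElem hwl]
  simp only [Option.getD_some]
  simp only [win, List.getElem_take, List.getElem_drop]
  congr 1
  omega

lemma win_dropLast (input : List Int) (i w : Nat) (hi : i + (w + 1) ≤ input.length) :
    (win input i (w + 1)).dropLast = win input i w := by
  apply List.ext_getElem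
  · simp [win]; omega
  · intro j h1 h2
    simp [win, List.getElem_dropLast, List.getElem_take, List.getElem_drop]

lemma dfs_one (x d n : Int) : dfs [x] d 0 n = 0 := by
  rw [dfs]; simp

lemma dfs_dir1 (l : List Int) (d a n : Int) (h : (d == 0) = false) :
    dfs l d a n = dfs l 1 a n := by
  cases l with
  | nil => rw [dfs, dfs]
  | cons x xs => rw [dfs, dfs]; simp [h]

lemma dfs_dir0 (l : List Int) (d a n : Int) (h : (d == 0) = true) :
    dfs l d a n = dfs l 0 a n := by
  cases l with
  | nil => rw [dfs, dfs]
  | cons x xs => rw [dfs, dfs]; simp [h]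

-- the two one-step recursion equations for dfs on an index window, answer 0
lemma dfs0_win (input : List Int) (n : Int) (i w : Nat) (h1 : 1 ≤ w)
    (hi : i + (w + 1) ≤ input.length) :
    dfs (win input i (w + 1)) 0 0 n
      = min (dfs (win input (i + 1) w) 0 0 n + input.getD (i + 1) 0 - input.getD i 0)
            (dfs (win input (i + 1) w) 1 0 n + n - input.getD (i + w) 0 + input.getD i 0) := by
  have hilt : i < input.length := by omega
  have hne : (win input (i + 1) w).isEmpty = false := by
    simp [← List.length_eq_zero_iff, win_length input (i+1) w (by omega)]
    omega
  rw [win_cons input i w hilt, dfs]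
  simp only [beq_self_eq_true, if_true, hne, Bool.false_eq_true, if_false]
  rw [win_headD input (i+1) w h1 (by omega),
      win_getLastD input (i+1) w h1 (by omega),
      show i + 1 + w - 1 = i + w from by omega]
  rw [dfs_add (win input (i+1) w) 0 (0 + input.getD (i+1) 0 - input.getD i 0) n,
      dfs_add (win input (i+1) w) 1 (0 + n - input.getD (i+w) 0 + input.getD i 0) n]
  omega

lemma dfs1_win (input : List Int) (n : Int) (i w : Nat) (h1 : 1 ≤ w)
    (hi : i + (w + 1) ≤ input.length) :
    dfs (win input i (w + 1)) 1 0 n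
      = min (dfs (win input i w) 0 0 n + input.getD (i + w) 0 - input.getD (i + w - 1) 0)
            (dfs (win input i w) 1 0 n + n - input.getD (i + w) 0 + input.getD i 0) := by
  have hilt : i < input.length := by omega
  have hcons := win_cons input i w hilt
  have hne : (win input i w).isEmpty = false := by
    simp [← List.length_eq_zero_iff, win_length input i w (by omega)]
    omega
  have hdl : (input.getD i 0 :: win input (i + 1) w).dropLast = win input i w := by
    rw [← hcons]; exact win_dropLast input i w hi
  have hgl : (input.getD i 0 :: win input (i + 1) w).getLastD 0 = input.getD (i + w) 0 := by
    rw [← hcons]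
    rw [win_getLastD input i (w + 1) (by omega) hi]
    congr 1
  rw [hcons, dfs]
  simp only [show ((1 : Int) == 0) = false from rfl, Bool.false_eq_true, if_false,
             hdl, hgl, hne]
  rw [win_headD input i w h1 hilt,
      win_getLastD input i w h1 (by omega)]
  rw [dfs_add (win input i w) 0 (0 + input.getD (i + w) 0 - input.getD (i + w - 1) 0) n,
      dfs_add (win input i w) 1 (0 + n - input.getD (i + w) 0 + input.getD i 0) n]
  omega

lemma foldl_pair_append (l : List Nat) (h1 h2 : Nat → Int) (a b : List Int) :
    l.foldl (fun g i => (g.1 ++ [h1 i], g.2 ++ [h2 i])) (a, b)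
      = (a ++ l.map h1, b ++ l.map h2) := by
  induction l generalizing a b with
  | nil => simp
  | cons x xs ih => simp [ih]

-- invariant carried by the outer fold: arrays of values of dfs on all windows of length w
def WinInv (input : List Int) (n : Int) (m w : Nat) (f : List Int × List Int) : Prop :=
  f.1 = (List.range (m + 1 - w)).map (fun i => dfs (win input i w) 0 0 n) ∧
  f.2 = (List.range (m + 1 - w)).map (fun i => dfs (win input i w) 1 0 n)

lemma mapRange_getD (f : Nat → Int) (q k : Nat) (h : k < q) :
    ((List.range q).map f).getD k 0 = f k := by
  rw [List.getD_eq_getElem _ _ (by simpa using h)]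
  simp

lemma inv_step (input : List Int) (n : Int) (m L : Nat) (hm : m = input.length)
    (hL : 1 ≤ L) (hLm : L ≤ m - 1) (f : List Int × List Int)
    (hf : WinInv input n m L f) : WinInv input n m (L + 1) (dfsAltStep input n m f L) := by
  obtain ⟨hf1, hf2⟩ := hf
  have hq : m + 1 - L = (m - L) + 1 := by omega
  have hw : m + 1 - (L + 1) = m - L := by omega
  have hm2 : 2 ≤ m := by omega
  unfold dfsAltStep
  rw [foldl_pair_append]
  constructor
  · simp only [List.nil_append, hw]
    apply List.map_congr_left
    intro i hi
    rw [List.mem_range] at hi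
    rw [hf1, hf2, mapRange_getD _ _ _ (by omega), mapRange_getD _ _ _ (by omega),
        dfs0_win input n i L hL (by omega)]
  · simp only [List.nil_append, hw]
    apply List.map_congr_left
    intro i hi
    rw [List.mem_range] at hi
    rw [hf1, hf2, mapRange_getD _ _ _ (by omega), mapRange_getD _ _ _ (by omega),
        dfs1_win input n i L hL (by omega)]

lemma win_one (input : List Int) (i : Nat) (hi : i < input.length) :
    win input i 1 = [input.getD i 0] := by
  rw [win_cons input i 0 hi]
  simp [win]

lemma inv_base (input : List Int) (n : Int) (m : Nat) (hm : m = input.length) :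
    WinInv input n m 1 (List.replicate m 0, List.replicate m 0) := by
  constructor <;>
  · simp only [Nat.add_sub_cancel]
    symm
    rw [List.eq_replicate_iff]
    refine ⟨by simp, ?_⟩
    intro b hb
    simp only [List.mem_map, List.mem_range] at hb
    obtain ⟨i, hi, rfl⟩ := hb
    rw [win_one input i (by omega)]
    exact dfs_one _ _ _

lemma inv_fold_aux (input : List Int) (n : Int) (m : Nat) (hm : m = input.length) :
    ∀ j, j ≤ m - 1 → WinInv input n m (j + 1)
      ((List.range' 1 j).foldl (dfsAltStep input n m)
        (List.replicate m 0, List.replicate m 0)) := by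
  intro j
  induction j with
  | zero => intro _; exact inv_base input n m hm
  | succ j ih =>
    intro hj
    rw [List.range'_concat, List.foldl_append, List.foldl_cons, List.foldl_nil,
        show 1 + 1 * j = j + 1 from by omega]
    exact inv_step input n m (j + 1) hm (by omega) (by omega) _ (ih (by omega))

lemma inv_fold (input : List Int) (n : Int) (m : Nat) (hm : m = input.length) (hm2 : 2 ≤ m) :
    WinInv input n m m ((List.range' 1 (m - 1)).foldl (dfsAltStep input n m)
      (List.replicate m 0, List.replicate m 0)) := by
  have := inv_fold_aux input n m hm (m - 1) le_rfl
  rwa [show m - 1 + 1 = m from by omega] at this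

-- ===== VERDICT (by name: the statement is the Claim_ definition above) =====
theorem dfs_spec : Claim_equal_dfs := by
  intro input dir answer n _
  show dfs input dir answer n = dfs_alt input dir answer n
  by_cases hm : input.length ≤ 1
  · match input, hm with
    | [], _ => rw [dfs]; simp [dfs_alt]
    | [x], _ => rw [dfs]; simp [dfs_alt]
  · have hm2 : 2 ≤ input.length := by omega
    obtain ⟨h1, h2⟩ := inv_fold input n input.length rfl hm2
    simp only [dfs_alt, if_neg hm]
    rw [h1, h2, show input.length + 1 - input.length = 1 from by omega]
    have hwin : win input 0 input.length = input := by simp [win]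
    by_cases hd : dir == 0
    · rw [dfs_dir0 input dir answer n hd, dfs_add]
      simp [hd, hwin]
    · rw [dfs_dir1 input dir answer n (by simpa using hd), dfs_add]
      simp [hd, hwin]
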